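-- pv_equiv track=rewrite | github.com/greggie87/battleship-game | run.py | check_boat
-- ===== SOURCE A (Python) =====
-- def check_ok(boat, taken):
--     """
--     Checks boat is fully on the board
--     """
--     boat.sort()
--     for i in range(len(boat)):
--         num = boat[i]
--         if num in taken:
--             boat = [-1]
--             break
--         elif num < 0 or num > 99:
--             boat = [-1]
--             break
--         elif num % 10 == 9 and i < len(boat)-1:
--             if boat[i+1] % 10 == 0:
--                 boat = [-1]
--                 break
--         if i != 0:
--             if boat[i] != boat[i-1]+1 and boat[i] != boat[i-1]+10:
--                 boat = [-1]
--                 break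
--
--     return boat
--
-- def check_boat(b, start, dirn, taken):
--     """
--     Checks boat direction
--     """
--     boat = []
--     if dirn == 1:
--         for i in range(b):
--             boat.append(start - i*10)
--     elif dirn == 2:
--         for i in range(b):
--             boat.append(start + i)
--     elif dirn == 3:
--         for i in range(b):
--             boat.append(start + i*10)
--     elif dirn == 4:
--         for i in range(b):
--             boat.append(start - i)
--     boat = check_ok(boat, taken)
--     return boat
-- ===== SOURCE B (Python) =====
-- def check_boat(b, start, dirn, taken):
--     """Closed form: a valid boat is an arithmetic progression; check its
--     endpoints and row arithmetic instead of scanning the cells."""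
--     d = {1: -10, 2: 1, 3: 10, 4: -1}.get(dirn)
--     if d is None or b <= 0:
--         return []
--     step = abs(d)
--     lo = start if d > 0 else start - (b - 1) * step
--     hi = lo + (b - 1) * step
--     if lo < 0 or hi > 99:
--         return [-1]
--     if step == 1 and lo // 10 != hi // 10:
--         return [-1]
--     if any(lo <= t <= hi and (t - lo) % step == 0 for t in taken):
--         return [-1]
--     return list(range(lo, hi + 1, step))
-- ===== Notes on version B (the rewrite author's own statement) =====
-- stated objective: alternative
-- what changed: A materialises the boat cell by cell, sorts it, and runs an interleaved per-cell validating loop (membership, bounds, row-wrap, adjacency with early breaks); B never builds the candidate list: it computes the progression's endpoints lo/hi in closed form, validates by endpoint bounds and one floor-division row comparison, checks taken by arithmetic membership in the progression (one pass over taken), and only then emits range(lo, hi+1, step).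
import Mathlib
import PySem

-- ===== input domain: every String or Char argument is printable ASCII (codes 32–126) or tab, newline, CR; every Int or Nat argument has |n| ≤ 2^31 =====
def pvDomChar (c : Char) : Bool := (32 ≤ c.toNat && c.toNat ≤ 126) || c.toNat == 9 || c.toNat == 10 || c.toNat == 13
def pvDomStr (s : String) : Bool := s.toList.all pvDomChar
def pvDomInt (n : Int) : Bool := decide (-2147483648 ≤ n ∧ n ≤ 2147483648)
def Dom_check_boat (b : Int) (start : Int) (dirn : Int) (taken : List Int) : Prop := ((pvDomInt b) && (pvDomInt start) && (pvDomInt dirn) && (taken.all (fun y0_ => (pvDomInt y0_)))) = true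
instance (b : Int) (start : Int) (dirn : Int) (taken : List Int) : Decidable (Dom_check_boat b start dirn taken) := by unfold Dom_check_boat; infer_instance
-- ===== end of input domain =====

-- B replaces A's cell-list construction + sorting + per-cell validating loop with a closed
-- form: the boat is an arithmetic progression, validated by endpoint/row arithmetic alone.

-- ===== PORT A =====
-- the for-loop of check_ok, with its early 'boat = [-1]; break' exits
def pyCheckOkLoop (boat : List Int) (taken : List Int) (i : Nat) : List Int :=
  if _h : i < boat.length then
    if boat.getD i 0 ∈ taken then [-1]
    else if boat.getD i 0 < 0 ∨ 99 < boat.getD i 0 then [-1]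
    else if PySem.Int.mod (boat.getD i 0) 10 = 9 ∧ i < boat.length - 1 ∧
            PySem.Int.mod (boat.getD (i+1) 0) 10 = 0 then [-1]
    else if i ≠ 0 ∧ boat.getD i 0 ≠ boat.getD (i-1) 0 + 1 ∧
            boat.getD i 0 ≠ boat.getD (i-1) 0 + 10 then [-1]
    else pyCheckOkLoop boat taken (i+1)
  else boat
termination_by boat.length - i

-- boat.sort() ported as PySem.List.sorted (Python's stable sort, identity key)
def check_ok (boat : List Int) (taken : List Int) : List Int :=
  pyCheckOkLoop (PySem.List.sorted boat (fun x => x)) taken 0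

def check_boat (b : Int) (start : Int) (dirn : Int) (taken : List Int) : List Int :=
  let boat : List Int :=
    if dirn = 1 then (PySem.List.pyRange 0 b 1).foldl (fun acc i => acc ++ [start - i*10]) []
    else if dirn = 2 then (PySem.List.pyRange 0 b 1).foldl (fun acc i => acc ++ [start + i]) []
    else if dirn = 3 then (PySem.List.pyRange 0 b 1).foldl (fun acc i => acc ++ [start + i*10]) []
    else if dirn = 4 then (PySem.List.pyRange 0 b 1).foldl (fun acc i => acc ++ [start - i]) []
    else []
  check_ok boat taken

-- ===== PORT B =====
def check_boat_alt (b : Int) (start : Int) (dirn : Int) (taken : List Int) : List Int :=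
  let d? : Option Int :=
    if dirn = 1 then some (-10) else if dirn = 2 then some 1
    else if dirn = 3 then some 10 else if dirn = 4 then some (-1) else none
  match d? with
  | none => []
  | some d =>
    if b ≤ 0 then []
    else
      let step := |d|
      let lo := if 0 < d then start else start - (b - 1) * step
      let hi := lo + (b - 1) * step
      if lo < 0 ∨ 99 < hi then [-1]
      else if step = 1 ∧ PySem.Int.floordiv lo 10 ≠ PySem.Int.floordiv hi 10 then [-1]
      else if ∃ t ∈ taken, lo ≤ t ∧ t ≤ hi ∧ PySem.Int.mod (t - lo) step = 0 then [-1]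
      else PySem.List.pyRange lo (hi + 1) step

-- ===== PRECONDITION & SPEC =====
def Spec_check_boat (b : Int) (start : Int) (dirn : Int) (taken : List Int) (out : List Int) : Prop := out = check_boat_alt b start dirn taken
instance (b : Int) (start : Int) (dirn : Int) (taken : List Int) (out : List Int) : Decidable (Spec_check_boat b start dirn taken out) := by unfold Spec_check_boat; infer_instance

-- ===== CLAIM (what is proved, stated in full; the proofs are below) =====
def Claim_equal_check_boat : Prop := ∀ (b : Int) (start : Int) (dirn : Int) (taken : List Int), Dom_check_boat b start dirn taken → Spec_check_boat b start dirn taken (check_boat b start dirn taken)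

-- ===== LEMMAS AND PROOFS =====

-- the arithmetic progression lo, lo+step, …, lo+(n-1)*step
def prog (lo step : Int) (n : Nat) : List Int := (List.range n).map (fun k : Nat => lo + step * (k : Int))

lemma length_prog (lo step : Int) (n : Nat) : (prog lo step n).length = n := by
  simp [prog]

lemma prog_getD (lo step : Int) (n j : Nat) (h : j < n) :
    (prog lo step n).getD j 0 = lo + step * (j : Int) := by
  have hl : j < ((List.range n).map (fun k : Nat => lo + step * (k : Int))).length := by simpa using h
  rw [prog, List.getD_eq_getElem _ 0 hl, List.getElem_map, List.getElem_range]

-- the failure condition A's loop tests at index j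
abbrev failAt (s taken : List Int) (j : Nat) : Prop :=
  s.getD j 0 ∈ taken ∨ s.getD j 0 < 0 ∨ 99 < s.getD j 0 ∨
  (PySem.Int.mod (s.getD j 0) 10 = 9 ∧ j < s.length - 1 ∧ PySem.Int.mod (s.getD (j+1) 0) 10 = 0) ∨
  (j ≠ 0 ∧ s.getD j 0 ≠ s.getD (j-1) 0 + 1 ∧ s.getD j 0 ≠ s.getD (j-1) 0 + 10)

lemma loop_eq (s taken : List Int) :
    ∀ k i, s.length - i ≤ k →
      pyCheckOkLoop s taken i =
        if ∃ j, j < s.length ∧ i ≤ j ∧ failAt s taken j then [-1] else s := by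
  intro k
  induction k with
  | zero =>
    intro i h
    have hi : ¬ i < s.length := by omega
    rw [pyCheckOkLoop, dif_neg hi, if_neg]
    rintro ⟨j, hj, hij, -⟩; omega
  | succ k ih =>
    intro i h
    by_cases hi : i < s.length
    · rw [pyCheckOkLoop, dif_pos hi]
      by_cases h1 : s.getD i 0 ∈ taken
      · rw [if_pos h1, if_pos ⟨i, hi, le_refl i, by unfold failAt; tauto⟩]
      rw [if_neg h1]
      by_cases h2 : s.getD i 0 < 0 ∨ 99 < s.getD i 0
      · rw [if_pos h2, if_pos ⟨i, hi, le_refl i, by unfold failAt; tauto⟩]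
      rw [if_neg h2]
      by_cases h3 : PySem.Int.mod (s.getD i 0) 10 = 9 ∧ i < s.length - 1 ∧
          PySem.Int.mod (s.getD (i+1) 0) 10 = 0
      · rw [if_pos h3, if_pos ⟨i, hi, le_refl i, by unfold failAt; tauto⟩]
      rw [if_neg h3]
      by_cases h4 : i ≠ 0 ∧ s.getD i 0 ≠ s.getD (i-1) 0 + 1 ∧ s.getD i 0 ≠ s.getD (i-1) 0 + 10
      · rw [if_pos h4, if_pos ⟨i, hi, le_refl i, by unfold failAt; tauto⟩]
      rw [if_neg h4, ih (i+1) (by omega)]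
      have hfi : ¬ failAt s taken i := by unfold failAt; tauto
      have hiff : (∃ j, j < s.length ∧ i + 1 ≤ j ∧ failAt s taken j) ↔
          (∃ j, j < s.length ∧ i ≤ j ∧ failAt s taken j) := by
        constructor
        · rintro ⟨j, hj, hij, hf⟩; exact ⟨j, hj, by omega, hf⟩
        · rintro ⟨j, hj, hij, hf⟩
          rcases Nat.eq_or_lt_of_le hij with rfl | hlt
          · exact absurd hf hfi
          · exact ⟨j, hj, hlt, hf⟩
      simp only [hiff]
    · rw [pyCheckOkLoop, dif_neg hi, if_neg]
      rintro ⟨j, hj, hij, -⟩; omega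

-- the sorted boat IS the progression: ascending case
lemma prog_pairwise (lo step : Int) (hstep : 0 < step) (n : Nat) :
    (prog lo step n).Pairwise (fun a b => (fun x => x) a < (fun x => x) b) := by
  rw [List.pairwise_iff_getElem]
  intro i j hi hj hij
  rw [length_prog] at hi hj
  simp only [prog, List.getElem_map, List.getElem_range]
  show lo + step * (i : Int) < lo + step * (j : Int)
  have : step * (i : Int) < step * (j : Int) := by
    apply mul_lt_mul_of_pos_left _ hstep
    exact_mod_cast hij
  omega

lemma sorted_prog (lo step : Int) (hstep : 0 < step) (n : Nat) :
    PySem.List.sorted (prog lo step n) (fun x => x) = prog lo step n :=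
  PySem.List.sorted_eq_of_perm_of_pairwise_lt _ _ _ (List.Perm.refl _) (prog_pairwise lo step hstep n)

lemma sorted_prog_rev (lo step : Int) (hstep : 0 < step) (n : Nat) :
    PySem.List.sorted ((prog lo step n).reverse) (fun x => x) = prog lo step n :=
  PySem.List.sorted_eq_of_perm_of_pairwise_lt _ _ _ (List.reverse_perm _).symm
    (prog_pairwise lo step hstep n)

-- a descending cell list is the reverse of the progression from its lowest cell
lemma map_desc_eq_reverse_prog (start step : Int) (n : Nat) :
    (List.range n).map (fun k : Nat => start - (k : Int) * step)
      = (prog (start - ((n : Int) - 1) * step) step n).reverse := by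
  apply List.ext_getElem
  · simp [prog]
  · intro i h1 h2
    simp only [List.length_map, List.length_range] at h1
    simp only [prog, List.getElem_map, List.getElem_range, List.getElem_reverse,
      List.length_map, List.length_range]
    have hcast : (((n - 1 - i : Nat)) : Int) = (n : Int) - 1 - (i : Int) := by omega
    rw [hcast]; ring

lemma map_asc_eq_prog (start d : Int) (n : Nat) :
    (List.range n).map (fun k : Nat => start + (k : Int) * d) = prog start d n := by
  rw [prog]
  exact List.map_congr_left (fun k _ => by ring)

-- the Python range(lo, hi+1, step) is that progression
lemma prog_eq_pyRange (lo step : Int) (hstep : 0 < step) (n : Nat) (hn : 1 ≤ n) :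
    PySem.List.pyRange lo (lo + ((n : Int) - 1) * step + 1) step = prog lo step n := by
  rw [PySem.List.pyRange_of_pos _ _ hstep, prog]
  have hn1 : (1 : Int) ≤ (n : Int) := by exact_mod_cast hn
  have hlt : lo < lo + ((n : Int) - 1) * step + 1 := by
    have := mul_nonneg (by omega : (0:Int) ≤ (n:Int) - 1) hstep.le
    omega
  rw [if_pos hlt]
  have hns : lo + ((n : Int) - 1) * step + 1 - lo + step - 1 = (n : Int) * step := by ring
  rw [hns, Int.mul_ediv_cancel _ (by omega : step ≠ 0), Int.toNat_natCast]

-- A's loop on the progression equals B's closed-form branch chain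
lemma main_eq (n : Nat) (hn : 1 ≤ n) (step : Int) (hs : step = 1 ∨ step = 10)
    (lo : Int) (taken : List Int) :
    pyCheckOkLoop (prog lo step n) taken 0 =
      (if lo < 0 ∨ 99 < lo + ((n : Int) - 1) * step then [-1]
       else if step = 1 ∧ PySem.Int.floordiv lo 10 ≠ PySem.Int.floordiv (lo + ((n : Int) - 1) * step) 10 then [-1]
       else if ∃ t ∈ taken, lo ≤ t ∧ t ≤ lo + ((n : Int) - 1) * step ∧ PySem.Int.mod (t - lo) step = 0 then [-1]
       else prog lo step n) := by
  have hn1 : (1 : Int) ≤ (n : Int) := by exact_mod_cast hn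
  rcases hs with rfl | rfl
  · -- step = 1
    rw [loop_eq (prog lo 1 n) taken (prog lo 1 n).length 0 (by omega)]
    simp only [Nat.zero_le, true_and, length_prog]
    rw [PySem.Int.floordiv_eq_ediv_of_pos (by norm_num : (0:Int) < 10),
        PySem.Int.floordiv_eq_ediv_of_pos (by norm_num : (0:Int) < 10)]
    by_cases hb : lo < 0 ∨ 99 < lo + ((n : Int) - 1) * 1
    · have hex : ∃ j, j < n ∧ failAt (prog lo 1 n) taken j := by
        rcases hb with hb | hb
        · refine ⟨0, by omega, ?_⟩
          unfold failAt
          rw [prog_getD lo 1 n 0 (by omega)]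
          exact Or.inr (Or.inl (by omega))
        · refine ⟨n - 1, by omega, ?_⟩
          unfold failAt
          rw [prog_getD lo 1 n (n-1) (by omega)]
          exact Or.inr (Or.inr (Or.inl (by omega)))
      rw [if_pos hex, if_pos hb]
    · rw [if_neg hb]
      by_cases hw : lo / 10 ≠ (lo + ((n : Int) - 1) * 1) / 10
      · have hex : ∃ j, j < n ∧ failAt (prog lo 1 n) taken j := by
          refine ⟨(9 - lo % 10).toNat, by omega, ?_⟩
          unfold failAt
          simp only [length_prog]
          rw [prog_getD lo 1 n _ (by omega), prog_getD lo 1 n _ (by omega)]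
          refine Or.inr (Or.inr (Or.inr (Or.inl ⟨?_, by omega, ?_⟩)))
          · rw [PySem.Int.mod_eq_emod_of_pos (by norm_num : (0:Int) < 10)]; omega
          · rw [PySem.Int.mod_eq_emod_of_pos (by norm_num : (0:Int) < 10)]; push_cast; omega
        rw [if_pos hex, if_pos hw]
      · rw [if_neg hw]
        have hiff : (∃ j, j < n ∧ failAt (prog lo 1 n) taken j) ↔
            (∃ t ∈ taken, lo ≤ t ∧ t ≤ lo + ((n : Int) - 1) * 1 ∧ PySem.Int.mod (t - lo) 1 = 0) := by
          constructor
          · rintro ⟨j, hj, hf⟩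
            unfold failAt at hf
            simp only [length_prog] at hf
            rw [prog_getD lo 1 n j hj] at hf
            rcases hf with hmem | hlow | hhigh2 | ⟨h9, hjlt, h0⟩ | ⟨hj0, hne1, hne10⟩
            · refine ⟨lo + 1 * (j : Int), hmem, by omega, by omega, ?_⟩
              rw [PySem.Int.mod_eq_emod_of_pos (by norm_num : (0:Int) < 1)]; omega
            · omega
            · omega
            · rw [prog_getD lo 1 n (j+1) (by omega)] at h0
              rw [PySem.Int.mod_eq_emod_of_pos (by norm_num : (0:Int) < 10)] at h9 h0
              push_cast at h9 h0
              omega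
            · rw [prog_getD lo 1 n (j-1) (by omega)] at hne1
              omega
          · rintro ⟨t, ht, h1, h2, h3⟩
            refine ⟨(t - lo).toNat, by omega, ?_⟩
            unfold failAt
            rw [prog_getD lo 1 n _ (by omega)]
            have ht' : lo + 1 * (((t - lo).toNat : Nat) : Int) = t := by omega
            rw [ht']
            exact Or.inl ht
        rw [if_congr hiff rfl rfl]
  · -- step = 10
    rw [loop_eq (prog lo 10 n) taken (prog lo 10 n).length 0 (by omega)]
    simp only [Nat.zero_le, true_and, length_prog]
    by_cases hb : lo < 0 ∨ 99 < lo + ((n : Int) - 1) * 10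
    · have hex : ∃ j, j < n ∧ failAt (prog lo 10 n) taken j := by
        rcases hb with hb | hb
        · refine ⟨0, by omega, ?_⟩
          unfold failAt
          rw [prog_getD lo 10 n 0 (by omega)]
          exact Or.inr (Or.inl (by omega))
        · refine ⟨n - 1, by omega, ?_⟩
          unfold failAt
          rw [prog_getD lo 10 n (n-1) (by omega)]
          exact Or.inr (Or.inr (Or.inl (by omega)))
      rw [if_pos hex, if_pos hb]
    · rw [if_neg hb, if_neg (by norm_num : ¬((10:Int) = 1 ∧
        PySem.Int.floordiv lo 10 ≠ PySem.Int.floordiv (lo + ((n : Int) - 1) * 10) 10))]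
      have hiff : (∃ j, j < n ∧ failAt (prog lo 10 n) taken j) ↔
          (∃ t ∈ taken, lo ≤ t ∧ t ≤ lo + ((n : Int) - 1) * 10 ∧ PySem.Int.mod (t - lo) 10 = 0) := by
        constructor
        · rintro ⟨j, hj, hf⟩
          unfold failAt at hf
          simp only [length_prog] at hf
          rw [prog_getD lo 10 n j hj] at hf
          rcases hf with hmem | hlow | hhigh2 | ⟨h9, hjlt, h0⟩ | ⟨hj0, hne1, hne10⟩
          · refine ⟨lo + 10 * (j : Int), hmem, by omega, by omega, ?_⟩
            rw [PySem.Int.mod_eq_emod_of_pos (by norm_num : (0:Int) < 10)]; omega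
          · omega
          · omega
          · rw [prog_getD lo 10 n (j+1) (by omega)] at h0
            rw [PySem.Int.mod_eq_emod_of_pos (by norm_num : (0:Int) < 10)] at h9 h0
            push_cast at h9 h0
            omega
          · rw [prog_getD lo 10 n (j-1) (by omega)] at hne1 hne10
            omega
        · rintro ⟨t, ht, h1, h2, h3⟩
          rw [PySem.Int.mod_eq_emod_of_pos (by norm_num : (0:Int) < 10)] at h3
          refine ⟨((t - lo) / 10).toNat, by omega, ?_⟩
          unfold failAt
          rw [prog_getD lo 10 n _ (by omega)]
          have ht' : lo + 10 * ((((t - lo) / 10).toNat : Nat) : Int) = t := by omega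
          rw [ht']
          exact Or.inl ht
      rw [if_congr hiff rfl rfl]

-- ===== VERDICT (by name: the statement is the Claim_ definition above) =====
-- built cell list for a positive direction d, as a map over List.range
lemma build_asc (b start d : Int) (hb : 0 ≤ b) :
    (PySem.List.pyRange 0 b 1).foldl (fun acc i => acc ++ [start + i*d]) []
      = (List.range b.toNat).map (fun k : Nat => start + (k : Int) * d) := by
  have h1 := PySem.List.foldl_append_singleton_eq_map (fun i => start + i*d) (PySem.List.pyRange 0 b 1) []
  simp only [List.nil_append] at h1
  rw [h1, PySem.List.pyRange_one, List.map_map,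
      show ((b : Int) - 0).toNat = b.toNat from by omega]
  exact List.map_congr_left (fun k _ => by simp only [Function.comp_apply]; ring)

lemma build_desc (b start d : Int) (hb : 0 ≤ b) :
    (PySem.List.pyRange 0 b 1).foldl (fun acc i => acc ++ [start - i*d]) []
      = (List.range b.toNat).map (fun k : Nat => start - (k : Int) * d) := by
  have h1 := PySem.List.foldl_append_singleton_eq_map (fun i => start - i*d) (PySem.List.pyRange 0 b 1) []
  simp only [List.nil_append] at h1
  rw [h1, PySem.List.pyRange_one, List.map_map,
      show ((b : Int) - 0).toNat = b.toNat from by omega]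
  exact List.map_congr_left (fun k _ => by simp only [Function.comp_apply]; ring)

lemma loop_nil (taken : List Int) : pyCheckOkLoop [] taken 0 = [] := by
  rw [pyCheckOkLoop]; simp

theorem check_boat_spec : Claim_equal_check_boat := by
  intro b start dirn taken _hdom
  unfold Spec_check_boat check_boat check_boat_alt check_ok
  by_cases h1 : dirn = 1
  · subst h1
    simp only [reduceIte]
    by_cases hb0 : b ≤ 0
    · rw [if_pos hb0, PySem.List.pyRange_one_eq_nil (by omega)]
      simp only [List.foldl_nil]
      rw [show PySem.List.sorted ([] : List Int) (fun x => x) = [] from rfl, loop_nil]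
    · rw [if_neg hb0]
      have hn : 1 ≤ b.toNat := by omega
      rw [build_desc b start 10 (by omega),
          map_desc_eq_reverse_prog start 10 b.toNat,
          sorted_prog_rev _ _ (by norm_num) b.toNat,
          main_eq b.toNat hn 10 (Or.inr rfl) _ taken]
      simp only [show |(-10 : Int)| = 10 from by norm_num, show ¬((0:Int) < -10) from by norm_num,
        if_false]
      rw [show b - 1 = (b.toNat : Int) - 1 from by omega,
          prog_eq_pyRange _ 10 (by norm_num) b.toNat hn]
  · by_cases h2 : dirn = 2
    · subst h2
      simp only [if_neg h1, reduceIte]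
      by_cases hb0 : b ≤ 0
      · rw [if_pos hb0, PySem.List.pyRange_one_eq_nil (by omega)]
        simp only [List.foldl_nil]
        rw [show PySem.List.sorted ([] : List Int) (fun x => x) = [] from rfl, loop_nil]
      · rw [if_neg hb0]
        have hn : 1 ≤ b.toNat := by omega
        have h1' : (PySem.List.pyRange 0 b 1).foldl (fun acc i => acc ++ [start + i]) []
            = (PySem.List.pyRange 0 b 1).foldl (fun acc i => acc ++ [start + i*1]) [] := by
          simp only [mul_one]
        rw [h1', build_asc b start 1 (by omega), map_asc_eq_prog,
            sorted_prog _ _ (by norm_num) b.toNat,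
            main_eq b.toNat hn 1 (Or.inl rfl) _ taken]
        simp only [show |(1 : Int)| = 1 from by norm_num, show (0:Int) < 1 from by norm_num,
          if_true]
        rw [show b - 1 = (b.toNat : Int) - 1 from by omega,
            prog_eq_pyRange _ 1 (by norm_num) b.toNat hn]
    · by_cases h3 : dirn = 3
      · subst h3
        simp only [if_neg h1, if_neg h2, reduceIte]
        by_cases hb0 : b ≤ 0
        · rw [if_pos hb0, PySem.List.pyRange_one_eq_nil (by omega)]
          simp only [List.foldl_nil]
          rw [show PySem.List.sorted ([] : List Int) (fun x => x) = [] from rfl, loop_nil]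
        · rw [if_neg hb0]
          have hn : 1 ≤ b.toNat := by omega
          rw [build_asc b start 10 (by omega), map_asc_eq_prog,
              sorted_prog _ _ (by norm_num) b.toNat,
              main_eq b.toNat hn 10 (Or.inr rfl) _ taken]
          simp only [show |(10 : Int)| = 10 from by norm_num, show (0:Int) < 10 from by norm_num,
            if_true]
          rw [show b - 1 = (b.toNat : Int) - 1 from by omega,
              prog_eq_pyRange _ 10 (by norm_num) b.toNat hn]
      · by_cases h4 : dirn = 4
        · subst h4
          simp only [if_neg h1, if_neg h2, if_neg h3, reduceIte]
          by_cases hb0 : b ≤ 0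
          · rw [if_pos hb0, PySem.List.pyRange_one_eq_nil (by omega)]
            simp only [List.foldl_nil]
            rw [show PySem.List.sorted ([] : List Int) (fun x => x) = [] from rfl, loop_nil]
          · rw [if_neg hb0]
            have hn : 1 ≤ b.toNat := by omega
            have h1' : (PySem.List.pyRange 0 b 1).foldl (fun acc i => acc ++ [start - i]) []
                = (PySem.List.pyRange 0 b 1).foldl (fun acc i => acc ++ [start - i*1]) [] := by
              simp only [mul_one]
            rw [h1', build_desc b start 1 (by omega), map_desc_eq_reverse_prog start 1 b.toNat,
                sorted_prog_rev _ _ (by norm_num) b.toNat,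
                main_eq b.toNat hn 1 (Or.inl rfl) _ taken]
            simp only [show |(-1 : Int)| = 1 from by norm_num, show ¬((0:Int) < -1) from by norm_num,
              if_false]
            rw [show b - 1 = (b.toNat : Int) - 1 from by omega,
                prog_eq_pyRange _ 1 (by norm_num) b.toNat hn]
        · simp only [if_neg h1, if_neg h2, if_neg h3, if_neg h4]
          rw [show PySem.List.sorted ([] : List Int) (fun x => x) = [] from rfl, loop_nil]
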